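-- pv_equiv track=rewrite | github.com/ccBitTorrent/ccbt | ccbt/interface/widgets/graph_widget.py | _calculate_peer_buckets
-- ===== SOURCE A (Python) =====
-- import math
-- from typing import TYPE_CHECKING, Any
--
-- def _calculate_peer_buckets(sample: dict[str, Any], total_slots: int) -> list[tuple[int, int]]:
--     """Distribute active/connected peers across dot slots for annotations."""
--     if total_slots <= 0:
--         return []
--
--     connected_peers = max(int(sample.get("connected_peers", 0)), 0)
--     active_peers = max(int(sample.get("active_peers", 0)), 0)
--
--     if connected_peers == 0 and active_peers == 0:
--         return [(0, 0)] * total_slots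
--
--     bucket_size = max(1, math.ceil(max(connected_peers, active_peers) / total_slots))
--     remaining_connected = connected_peers
--     remaining_active = active_peers
--     buckets: list[tuple[int, int]] = []
--
--     for _ in range(total_slots):
--         if remaining_connected <= 0 and remaining_active <= 0:
--             buckets.append((0, 0))
--             continue
--
--         connected_bucket = min(bucket_size, remaining_connected) if remaining_connected > 0 else 0
--         remaining_connected = max(0, remaining_connected - connected_bucket)
--
--         active_bucket = min(connected_bucket, remaining_active) if connected_bucket > 0 else 0
--         remaining_active = max(0, remaining_active - active_bucket)
--
--         buckets.append((active_bucket, connected_bucket))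
--
--     return buckets
-- ===== SOURCE B (Python) =====
-- def _calculate_peer_buckets(sample, total_slots):
--     """Distribute active/connected peers across dot slots for annotations."""
--     if total_slots <= 0:
--         return []
--
--     connected_peers = max(int(sample.get("connected_peers", 0)), 0)
--     active_peers = max(int(sample.get("active_peers", 0)), 0)
--
--     bucket_size = max(1, -(-max(connected_peers, active_peers) // total_slots))
--
--     buckets = []
--     for i in range(total_slots):
--         before = min(i * bucket_size, connected_peers)
--         after = min((i + 1) * bucket_size, connected_peers)
--         connected_bucket = after - before
--         active_bucket = min(connected_bucket, max(0, active_peers - before))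
--         buckets.append((active_bucket, connected_bucket))
--     return buckets
-- ===== Notes on version B (the rewrite author's own statement) =====
-- stated objective: alternative
-- what changed: The running-remainder state machine (remaining_connected/remaining_active mutated each slot, with a continue branch) is replaced by a stateless per-slot closed form: each slot's connected chunk is the difference of clamped prefix sums min(i*bucket_size, connected), and the active chunk is capped against the same prefix, so no loop state and no early-out branch remain; both-zero guard also disappears since the formula yields (0,0) slots naturally.
import Mathlib
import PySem

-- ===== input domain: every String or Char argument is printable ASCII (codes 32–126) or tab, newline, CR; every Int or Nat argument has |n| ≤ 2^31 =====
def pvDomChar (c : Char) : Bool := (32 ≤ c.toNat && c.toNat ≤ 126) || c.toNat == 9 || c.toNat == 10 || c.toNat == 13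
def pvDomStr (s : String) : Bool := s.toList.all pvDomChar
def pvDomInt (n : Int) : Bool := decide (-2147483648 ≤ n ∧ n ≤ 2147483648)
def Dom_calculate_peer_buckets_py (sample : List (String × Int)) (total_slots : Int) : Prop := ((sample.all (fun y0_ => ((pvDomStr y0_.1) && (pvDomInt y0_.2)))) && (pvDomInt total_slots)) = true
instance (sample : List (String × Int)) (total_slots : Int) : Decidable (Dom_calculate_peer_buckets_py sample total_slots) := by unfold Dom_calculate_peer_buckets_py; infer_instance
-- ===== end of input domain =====

-- B replaces A's running-remainder loop with a stateless per-slot prefix formula (alternative decomposition, same cost).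

-- ===== PORT A =====
-- loop body of A's for-loop, as a named helper (the loop variable is unused in A)
def pvStepA (bucket_size : Int) (st : Int × Int × List (Int × Int)) : Int × Int × List (Int × Int) :=
  let remaining_connected := st.1
  let remaining_active := st.2.1
  let buckets := st.2.2
  if remaining_connected ≤ 0 ∧ remaining_active ≤ 0 then
    (remaining_connected, remaining_active, buckets ++ [(0, 0)])
  else
    let connected_bucket := if remaining_connected > 0 then min bucket_size remaining_connected else 0
    let remaining_connected := max 0 (remaining_connected - connected_bucket)
    let active_bucket := if connected_bucket > 0 then min connected_bucket remaining_active else 0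
    let remaining_active := max 0 (remaining_active - active_bucket)
    (remaining_connected, remaining_active, buckets ++ [(active_bucket, connected_bucket)])

def calculate_peer_buckets_py (sample : List (String × Int)) (total_slots : Int) : List (Int × Int) :=
  if total_slots ≤ 0 then []
  else
    let connected_peers : Int := max (PySem.Dict.getD (PySem.Dict.mk sample) "connected_peers" 0) 0
    let active_peers : Int := max (PySem.Dict.getD (PySem.Dict.mk sample) "active_peers" 0) 0
    if connected_peers = 0 ∧ active_peers = 0 then
      List.replicate total_slots.toNat (0, 0)
    else
      -- math.ceil(x / total_slots): exact integer ceiling here (|ints| ≤ 2^31, so the float division then ceil is exact)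
      let bucket_size : Int := max 1 (-(PySem.Int.floordiv (-(max connected_peers active_peers)) total_slots))
      ((List.range total_slots.toNat).foldl (fun st _ => pvStepA bucket_size st)
        (connected_peers, active_peers, [])).2.2

-- ===== PORT B =====
-- B's per-slot closed form
def pvEntryB (connected_peers active_peers bucket_size : Int) (i : Nat) : Int × Int :=
  let before := min ((i : Int) * bucket_size) connected_peers
  let after := min (((i : Int) + 1) * bucket_size) connected_peers
  let connected_bucket := after - before
  let active_bucket := min connected_bucket (max 0 (active_peers - before))
  (active_bucket, connected_bucket)

def calculate_peer_buckets_py_alt (sample : List (String × Int)) (total_slots : Int) : List (Int × Int) :=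
  if total_slots ≤ 0 then []
  else
    let connected_peers : Int := max (PySem.Dict.getD (PySem.Dict.mk sample) "connected_peers" 0) 0
    let active_peers : Int := max (PySem.Dict.getD (PySem.Dict.mk sample) "active_peers" 0) 0
    -- -(-x // total_slots): integer ceiling division
    let bucket_size : Int := max 1 (-(PySem.Int.floordiv (-(max connected_peers active_peers)) total_slots))
    (List.range total_slots.toNat).map (pvEntryB connected_peers active_peers bucket_size)

-- ===== PRECONDITION & SPEC =====
def Spec_calculate_peer_buckets_py (sample : List (String × Int)) (total_slots : Int) (out : List (Int × Int)) : Prop := out = calculate_peer_buckets_py_alt sample total_slots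
instance (sample : List (String × Int)) (total_slots : Int) (out : List (Int × Int)) : Decidable (Spec_calculate_peer_buckets_py sample total_slots out) := by unfold Spec_calculate_peer_buckets_py; infer_instance

-- ===== CLAIM (what is proved, stated in full; the proofs are below) =====
def Claim_equal_calculate_peer_buckets_py : Prop := ∀ (sample : List (String × Int)) (total_slots : Int), Dom_calculate_peer_buckets_py sample total_slots → Spec_calculate_peer_buckets_py sample total_slots (calculate_peer_buckets_py sample total_slots)

-- ===== LEMMAS AND PROOFS =====

-- Loop invariant: after n iterations of A's loop the remainders are prefix-clamped
-- differences and the accumulated buckets are exactly B's per-slot entries.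
lemma pv_loop_inv (c a bs : Int) (hc : 0 ≤ c) (ha : 0 ≤ a) (hb : 1 ≤ bs) :
    ∀ n : Nat, (List.range n).foldl (fun st _ => pvStepA bs st) (c, a, []) =
      (c - min ((n : Int) * bs) c,
       max 0 (a - min ((n : Int) * bs) c),
       (List.range n).map (pvEntryB c a bs)) := by
  intro n
  induction n with
  | zero => simp; constructor <;> omega
  | succ n ih =>
    rw [List.range_succ, List.foldl_append, List.map_append, ih]
    simp only [List.foldl_cons, List.foldl_nil, List.map_cons, List.map_nil]
    have ht : 0 ≤ (n : Int) * bs := mul_nonneg (by positivity) (by omega)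
    have hcast : ((n + 1 : Nat) : Int) = (n : Int) + 1 := by push_cast; ring
    have hdist : ((n : Int) + 1) * bs = (n : Int) * bs + bs := by ring
    have ht' : 0 ≤ (n : Int) * bs + bs := by omega
    unfold pvStepA pvEntryB
    dsimp only
    rw [hcast, hdist]
    generalize (n : Int) * bs = t at ht hdist ht' ⊢
    split_ifs <;>
      simp only [Prod.mk.injEq, List.append_cancel_left_eq, List.cons.injEq, and_true] <;>
      omega
  
-- ===== VERDICT =====
theorem calculate_peer_buckets_py_spec : Claim_equal_calculate_peer_buckets_py := by
  intro sample total_slots _dom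
  unfold Spec_calculate_peer_buckets_py calculate_peer_buckets_py calculate_peer_buckets_py_alt
  by_cases hts : total_slots ≤ 0
  · simp [hts]
  · simp only [if_neg hts]
    set c : Int := max (PySem.Dict.getD (PySem.Dict.mk sample) "connected_peers" 0) 0 with hc_def
    set a : Int := max (PySem.Dict.getD (PySem.Dict.mk sample) "active_peers" 0) 0 with ha_def
    set bs : Int := max 1 (-(PySem.Int.floordiv (-(max c a)) total_slots)) with hbs_def
    have hc : 0 ≤ c := le_max_right _ _
    have ha : 0 ≤ a := le_max_right _ _
    have hb : 1 ≤ bs := le_max_left _ _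
    by_cases hz : c = 0 ∧ a = 0
    · simp only [if_pos hz]
      symm
      apply List.eq_replicate_iff.mpr
      refine ⟨by simp, ?_⟩
      intro x hx
      rcases List.mem_map.mp hx with ⟨i, _, hx⟩
      have hi : 0 ≤ (i : Int) * bs := mul_nonneg (by positivity) (by omega)
      have hi1 : 0 ≤ ((i : Int) + 1) * bs := mul_nonneg (by positivity) (by omega)
      rw [← hx]
      unfold pvEntryB
      simp only [hz.1, hz.2]
      refine Prod.ext (by simp; omega) (by simp; omega)
    · simp only [if_neg hz]
      rw [pv_loop_inv c a bs hc ha hb]
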